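-- pv_equiv track=rewrite | github.com/JasonAskew/hoot | segment_intent_validator.py | _check_segment_compatibility
-- ===== SOURCE A (Python) =====
-- def _check_segment_compatibility(intent_name: str, segment_name: str) -> bool:
--     """Check compatibility based on naming patterns and business logic"""
--
--     # Pension-specific restrictions
--     if "pension" in segment_name.lower():
--         # Deposit funds not applicable to pension accounts
--         if "deposit_funds" in intent_name:
--             return False
--
--     # Public/unauthenticated channel restrictions
--     if any(pattern in segment_name.lower() for pattern in ["public", "bt_account_super"]):
--         # bt_account_super appears to be a basic/public segment requiring authentication
--         # Many secure functions require proper login/profile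
--         restricted_intents = [
--             "deposit_funds", "withdrawal", "balance", "transactions",
--             "account_details", "personal_tax", "statements"
--         ]
--         if any(restricted in intent_name for restricted in restricted_intents):
--             return False
--
--     # Investment vs Super account restrictions
--     if "investment" in segment_name.lower():
--         super_only_intents = [
--             "rollover", "pension", "super_early", "centrelink",
--             "minimum_pension", "pension_payment"
--         ]
--         if any(super_intent in intent_name for super_intent in super_only_intents):
--             return False
--
--     return True
-- ===== SOURCE B (Python) =====
-- # Inverted index: keyed by intent marker -> segment patterns that forbid it,
-- # scanned intent-first with early return (rules merged per intent marker).
-- _FORBIDDEN_SEGMENTS_BY_INTENT = {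
--     "deposit_funds":   ("pension", "public", "bt_account_super"),
--     "withdrawal":      ("public", "bt_account_super"),
--     "balance":         ("public", "bt_account_super"),
--     "transactions":    ("public", "bt_account_super"),
--     "account_details": ("public", "bt_account_super"),
--     "personal_tax":    ("public", "bt_account_super"),
--     "statements":      ("public", "bt_account_super"),
--     "rollover":        ("investment",),
--     "pension":         ("investment",),
--     "super_early":     ("investment",),
--     "centrelink":      ("investment",),
--     "minimum_pension": ("investment",),
--     "pension_payment": ("investment",),
-- }
--
-- def _check_segment_compatibility(intent_name: str, segment_name: str) -> bool:
--     seg = segment_name.lower()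
--     for marker, seg_patterns in _FORBIDDEN_SEGMENTS_BY_INTENT.items():
--         if marker in intent_name:
--             if any(p in seg for p in seg_patterns):
--                 return False
--     return True
-- ===== Notes on version B (the rewrite author's own statement) =====
-- stated objective: alternative
-- what changed: Inverted the rule direction: instead of three segment-keyed if-blocks each scanning an intent list, B builds an index keyed by intent marker -> segment patterns that forbid it (rules merged per intent, e.g. deposit_funds gets pension+public+bt_account_super) and scans intent-first with early return.
import Mathlib
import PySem

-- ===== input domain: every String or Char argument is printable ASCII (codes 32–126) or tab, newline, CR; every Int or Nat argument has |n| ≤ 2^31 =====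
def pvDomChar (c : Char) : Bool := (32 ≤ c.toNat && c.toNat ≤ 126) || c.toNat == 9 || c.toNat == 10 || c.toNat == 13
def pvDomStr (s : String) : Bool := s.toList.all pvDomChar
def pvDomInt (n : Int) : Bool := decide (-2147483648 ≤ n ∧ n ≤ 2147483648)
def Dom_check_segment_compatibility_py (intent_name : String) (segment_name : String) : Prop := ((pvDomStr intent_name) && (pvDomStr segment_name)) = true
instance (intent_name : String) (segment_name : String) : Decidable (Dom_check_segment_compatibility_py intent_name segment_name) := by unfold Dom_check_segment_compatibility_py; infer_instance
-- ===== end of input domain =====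

-- B inverts A's rule direction: an index keyed by intent marker -> forbidding segment patterns,
-- scanned intent-first with early return (objective: alternative decomposition, same cost).
-- ===== PORT A =====
def check_segment_compatibility_py (intent_name : String) (segment_name : String) : Bool :=
  if PySem.Str.isIn "pension" (PySem.Str.lower segment_name) then
    if PySem.Str.isIn "deposit_funds" intent_name then false
    else pvAfterPension intent_name segment_name
  else pvAfterPension intent_name segment_name
where
  pvAfterPension (intent_name segment_name : String) : Bool :=
    if (["public", "bt_account_super"].any fun pattern => PySem.Str.isIn pattern (PySem.Str.lower segment_name)) then
      if (["deposit_funds", "withdrawal", "balance", "transactions",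
           "account_details", "personal_tax", "statements"].any fun restricted =>
             PySem.Str.isIn restricted intent_name) then false
      else pvAfterPublic intent_name segment_name
    else pvAfterPublic intent_name segment_name
  pvAfterPublic (intent_name segment_name : String) : Bool :=
    if PySem.Str.isIn "investment" (PySem.Str.lower segment_name) then
      if (["rollover", "pension", "super_early", "centrelink",
           "minimum_pension", "pension_payment"].any fun super_intent =>
             PySem.Str.isIn super_intent intent_name) then false
      else true
    else true

-- ===== PORT B =====
-- _FORBIDDEN_SEGMENTS_BY_INTENT, in Python's dict insertion order
def pvForbiddenSegmentsByIntent : List (String × List String) :=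
  [ ("deposit_funds",   ["pension", "public", "bt_account_super"]),
    ("withdrawal",      ["public", "bt_account_super"]),
    ("balance",         ["public", "bt_account_super"]),
    ("transactions",    ["public", "bt_account_super"]),
    ("account_details", ["public", "bt_account_super"]),
    ("personal_tax",    ["public", "bt_account_super"]),
    ("statements",      ["public", "bt_account_super"]),
    ("rollover",        ["investment"]),
    ("pension",         ["investment"]),
    ("super_early",     ["investment"]),
    ("centrelink",      ["investment"]),
    ("minimum_pension", ["investment"]),
    ("pension_payment", ["investment"]) ]

-- the for-loop over the dict items, with its early `return False`
def pvScanForbidden (intent_name : String) (seg : String) : List (String × List String) → Bool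
  | [] => true
  | (marker, seg_patterns) :: rest =>
    if PySem.Str.isIn marker intent_name then
      if seg_patterns.any (fun p => PySem.Str.isIn p seg) then false
      else pvScanForbidden intent_name seg rest
    else pvScanForbidden intent_name seg rest

def check_segment_compatibility_py_alt (intent_name : String) (segment_name : String) : Bool :=
  let seg := PySem.Str.lower segment_name
  pvScanForbidden intent_name seg pvForbiddenSegmentsByIntent

-- ===== PRECONDITION & SPEC =====
def Spec_check_segment_compatibility_py (intent_name : String) (segment_name : String) (out : Bool) : Prop := out = check_segment_compatibility_py_alt intent_name segment_name
instance (intent_name : String) (segment_name : String) (out : Bool) : Decidable (Spec_check_segment_compatibility_py intent_name segment_name out) := by unfold Spec_check_segment_compatibility_py; infer_instance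

-- ===== CLAIM (what is proved, stated in full; the proofs are below) =====
def Claim_equal_check_segment_compatibility_py : Prop := ∀ (intent_name : String) (segment_name : String), Dom_check_segment_compatibility_py intent_name segment_name → Spec_check_segment_compatibility_py intent_name segment_name (check_segment_compatibility_py intent_name segment_name)

-- ===== LEMMAS AND PROOFS =====
-- 'if guard: (if hit: return False); fall through' as one Bool formula
theorem pvGuard_eq (p d r : Bool) :
    (if p = true then (if d = true then false else r) else r) = (!(p && d) && r) := by
  cases p <;> cases d <;> cases r <;> rfl

-- the Boolean identity behind the rule inversion: a..d are the segment-pattern atoms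
-- (pension, public, bt_account_super, investment in seg), e..q the intent-marker atoms
theorem pvRuleInversion (a b c d e f g h i j k l m n o p q : Bool) :
    (!(a && e) && (!((b || c) && (e || (f || (g || (h || (i || (j || k))))))) &&
      (!(d && (l || (m || (n || (o || (p || q)))))) && true))) =
    (!(e && (a || (b || c))) && (!(f && (b || c)) && (!(g && (b || c)) && (!(h && (b || c)) &&
      (!(i && (b || c)) && (!(j && (b || c)) && (!(k && (b || c)) && (!(l && d) && (!(m && d) &&
      (!(n && d) && (!(o && d) && (!(p && d) && (!(q && d) && true))))))))))))) := by
  cases a <;> cases b <;> cases c <;> cases d <;> simp [Bool.and_assoc, Bool.and_self_left]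

-- ===== VERDICT (by name: the statement is the Claim_ definition above) =====
theorem check_segment_compatibility_py_spec : Claim_equal_check_segment_compatibility_py := by
  intro intent_name segment_name _
  unfold Spec_check_segment_compatibility_py
  simp only [check_segment_compatibility_py, check_segment_compatibility_py.pvAfterPension,
    check_segment_compatibility_py.pvAfterPublic, check_segment_compatibility_py_alt,
    pvForbiddenSegmentsByIntent, pvScanForbidden,
    List.any_cons, List.any_nil, Bool.or_false, pvGuard_eq]
  generalize PySem.Str.isIn "pension" (PySem.Str.lower segment_name) = a
  generalize PySem.Str.isIn "public" (PySem.Str.lower segment_name) = b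
  generalize PySem.Str.isIn "bt_account_super" (PySem.Str.lower segment_name) = c
  generalize PySem.Str.isIn "investment" (PySem.Str.lower segment_name) = d
  generalize PySem.Str.isIn "deposit_funds" intent_name = e
  generalize PySem.Str.isIn "withdrawal" intent_name = f
  generalize PySem.Str.isIn "balance" intent_name = g
  generalize PySem.Str.isIn "transactions" intent_name = h
  generalize PySem.Str.isIn "account_details" intent_name = i
  generalize PySem.Str.isIn "personal_tax" intent_name = j
  generalize PySem.Str.isIn "statements" intent_name = k
  generalize PySem.Str.isIn "rollover" intent_name = l
  generalize PySem.Str.isIn "pension" intent_name = m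
  generalize PySem.Str.isIn "super_early" intent_name = n
  generalize PySem.Str.isIn "centrelink" intent_name = o
  generalize PySem.Str.isIn "minimum_pension" intent_name = p
  generalize PySem.Str.isIn "pension_payment" intent_name = q
  exact pvRuleInversion a b c d e f g h i j k l m n o p q
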